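-- pv_equiv track=rewrite | github.com/sebasgraciavalderrama/python-z2h | Functions/Exercises.py | summer_69_actual_solution
-- ===== SOURCE A (Python) =====
-- def summer_69_actual_solution(arr):
--     total = 0
--     add = True
--     for num in arr:
--         while add:
--             if num != 6:
--                 total += num
--                 break
--             else:
--                 add = False
--         while not add:
--             if num != 9:
--                 break
--             else:
--                 add = True
--                 break
--     return total
-- ===== SOURCE B (Python) =====
-- def summer_69_actual_solution(arr):
--     if 6 not in arr:
--         return sum(arr)
--     i = arr.index(6)
--     rest = arr[i + 1:]
--     if 9 not in rest:
--         return sum(arr[:i])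
--     j = rest.index(9)
--     return sum(arr[:i]) + summer_69_actual_solution(rest[j + 1:])
-- ===== Notes on version B (the rewrite author's own statement) =====
-- stated objective: simpler
-- what changed: Replaced A's per-element add-flag state machine (two inner while loops toggling a boolean) by boundary-finding recursion: sum the prefix before the first 6, jump to the first 9 after it with index(), and recurse on the remainder.
import Mathlib
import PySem

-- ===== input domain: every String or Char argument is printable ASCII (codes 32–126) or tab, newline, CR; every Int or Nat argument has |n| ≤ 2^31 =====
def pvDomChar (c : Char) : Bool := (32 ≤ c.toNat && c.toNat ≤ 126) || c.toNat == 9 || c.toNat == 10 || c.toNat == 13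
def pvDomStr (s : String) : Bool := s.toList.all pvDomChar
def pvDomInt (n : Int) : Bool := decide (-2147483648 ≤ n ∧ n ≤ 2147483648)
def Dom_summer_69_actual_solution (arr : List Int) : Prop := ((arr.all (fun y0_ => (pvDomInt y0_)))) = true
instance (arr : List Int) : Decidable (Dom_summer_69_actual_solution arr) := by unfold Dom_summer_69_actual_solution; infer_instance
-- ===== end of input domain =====

-- B replaces A's per-element add-flag state machine by boundary finding: sum the prefix
-- before the first 6, skip to the first 9 after it, recurse on the remainder (objective: simpler).

-- ===== PORT A =====
-- one iteration of A's for-loop body: the 'while add' loop (at most two passes: add or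
-- set add=False and fall through) then the 'while not add' loop (re-arm on a 9)
def pvStepA (s : Int × Bool) (num : Int) : Int × Bool :=
  let s1 := if s.2 then (if num ≠ 6 then (s.1 + num, s.2) else (s.1, false)) else s
  if ¬ s1.2 ∧ num = 9 then (s1.1, true) else s1

def summer_69_actual_solution (arr : List Int) : Int :=
  (arr.foldl pvStepA (0, true)).1

-- ===== PORT B =====
-- transliteration of Source B: 'x in arr' → ∈, arr.index(x) → List.idxOf, slices → take/drop, sum → List.sum
def summer_69_actual_solution_alt (arr : List Int) : Int :=
  if h6 : (6 : Int) ∈ arr then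
    let i := arr.idxOf 6
    let rest := arr.drop (i + 1)
    if (9 : Int) ∈ rest then
      let j := rest.idxOf 9
      (arr.take i).sum + summer_69_actual_solution_alt (rest.drop (j + 1))
    else
      (arr.take i).sum
  else
    arr.sum
termination_by arr.length
decreasing_by
  have hne : arr ≠ [] := by rintro rfl; simp at h6
  have hlen : 0 < arr.length := List.length_pos_iff.mpr hne
  simp only [List.length_drop]
  omega

-- ===== PRECONDITION & SPEC =====
def Spec_summer_69_actual_solution (arr : List Int) (out : Int) : Prop := out = summer_69_actual_solution_alt arr
instance (arr : List Int) (out : Int) : Decidable (Spec_summer_69_actual_solution arr out) := by unfold Spec_summer_69_actual_solution; infer_instance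

-- ===== CLAIM (what is proved, stated in full; the proofs are below) =====
def Claim_equal_summer_69_actual_solution : Prop := ∀ (arr : List Int), Dom_summer_69_actual_solution arr → Spec_summer_69_actual_solution arr (summer_69_actual_solution arr)

-- ===== LEMMAS AND PROOFS =====

-- structural characterisation of A's state machine: value from the add=true state (altT)
-- and from the add=false / skipping state (altF)
mutual
  def altT : List Int → Int
    | [] => 0
    | x :: xs => if x = 6 then altF xs else x + altT xs
  def altF : List Int → Int
    | [] => 0
    | x :: xs => if x = 9 then altT xs else altF xs
end

theorem foldA_char (arr : List Int) : ∀ t : Int,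
    ((arr.foldl pvStepA (t, true)).1 = t + altT arr) ∧
    ((arr.foldl pvStepA (t, false)).1 = t + altF arr) := by
  induction arr with
  | nil => intro t; simp [altT, altF]
  | cons x xs ih =>
    intro t
    by_cases h6 : x = 6
    · subst h6
      have hs : pvStepA (t, true) 6 = (t, false) := by simp [pvStepA]
      have hs' : pvStepA (t, false) 6 = (t, false) := by simp [pvStepA]
      simp only [List.foldl_cons, hs, hs']
      have h69 : (6 : Int) ≠ 9 := by norm_num
      simp only [altT, altF, if_pos rfl, if_neg h69]
      exact ⟨(ih t).2, (ih t).2⟩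
    · by_cases h9 : x = 9
      · subst h9
        have hs : pvStepA (t, true) 9 = (t + 9, true) := by simp [pvStepA]
        have hs' : pvStepA (t, false) 9 = (t, true) := by simp [pvStepA]
        simp only [List.foldl_cons, hs, hs']
        simp [altT, altF, h6]
        constructor
        · rw [(ih (t + 9)).1]; ring
        · exact (ih t).1
      · have hs : pvStepA (t, true) x = (t + x, true) := by simp [pvStepA, h6, h9]
        have hs' : pvStepA (t, false) x = (t, false) := by simp [pvStepA, h9]
        simp only [List.foldl_cons, hs, hs']
        simp [altT, altF, h6, h9]
        constructor
        · rw [(ih (t + x)).1]; ring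
        · exact (ih t).2

theorem not_mem_take_idxOf' (x : Int) (l : List Int) : x ∉ l.take (l.idxOf x) := by
  induction l with
  | nil => simp
  | cons a t ih =>
    by_cases h : a = x
    · simp [List.idxOf_cons, h]
    · simp [List.idxOf_cons, show (a == x) = false from beq_eq_false_iff_ne.mpr h, ih]
      exact fun hh => h hh.symm

theorem altT_append (p l : List Int) (hp : (6 : Int) ∉ p) :
    altT (p ++ l) = p.sum + altT l := by
  induction p with
  | nil => simp
  | cons a t ih =>
    have ha : a ≠ 6 := fun h => hp (h ▸ List.mem_cons_self)
    have ht : (6 : Int) ∉ t := fun h => hp (List.mem_cons_of_mem _ h)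
    simp [altT, ha, ih ht]
    ring

theorem altF_append (q l : List Int) (hq : (9 : Int) ∉ q) :
    altF (q ++ l) = altF l := by
  induction q with
  | nil => simp
  | cons a t ih =>
    have ha : a ≠ 9 := fun h => hq (h ▸ List.mem_cons_self)
    have ht : (9 : Int) ∉ t := fun h => hq (List.mem_cons_of_mem _ h)
    simp [altF, ha, ih ht]

theorem split_at_idxOf (x : Int) (l : List Int) (hx : x ∈ l) :
    l = l.take (l.idxOf x) ++ x :: l.drop (l.idxOf x + 1) := by
  have hlt : l.idxOf x < l.length := List.idxOf_lt_length_of_mem hx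
  have hget : l[l.idxOf x]'hlt = x := List.getElem_idxOf hlt
  conv_lhs => rw [← List.take_append_drop (l.idxOf x) l]
  rw [List.drop_eq_getElem_cons hlt, hget]

theorem altT_eq_alt : ∀ (n : Nat) (arr : List Int), arr.length ≤ n →
    altT arr = summer_69_actual_solution_alt arr := by
  intro n
  induction n with
  | zero =>
    intro arr hlen
    have : arr = [] := List.eq_nil_of_length_eq_zero (Nat.le_zero.mp hlen)
    subst this
    simp [summer_69_actual_solution_alt, altT]
  | succ n ih =>
    intro arr hlen
    by_cases h6 : (6 : Int) ∈ arr
    · have hlt : arr.idxOf 6 < arr.length := List.idxOf_lt_length_of_mem h6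
      have hsplit := split_at_idxOf 6 arr h6
      have hT : altT arr = (arr.take (arr.idxOf 6)).sum + altF (arr.drop (arr.idxOf 6 + 1)) := by
        conv_lhs => rw [hsplit]
        rw [altT_append _ _ (not_mem_take_idxOf' 6 arr)]
        simp [altT]
      by_cases h9 : (9 : Int) ∈ arr.drop (arr.idxOf 6 + 1)
      · have hsplit9 := split_at_idxOf 9 _ h9
        have hF : altF (arr.drop (arr.idxOf 6 + 1)) =
            altT ((arr.drop (arr.idxOf 6 + 1)).drop ((arr.drop (arr.idxOf 6 + 1)).idxOf 9 + 1)) := by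
          conv_lhs => rw [hsplit9]
          rw [altF_append _ _ (not_mem_take_idxOf' 9 _)]
          simp [altF]
        have hlen' : ((arr.drop (arr.idxOf 6 + 1)).drop ((arr.drop (arr.idxOf 6 + 1)).idxOf 9 + 1)).length ≤ n := by
          simp only [List.length_drop]
          omega
        rw [hT, hF, ih _ hlen']
        conv_rhs => rw [summer_69_actual_solution_alt]
        simp only [dif_pos h6, if_pos h9]
      · have hF : altF (arr.drop (arr.idxOf 6 + 1)) = 0 := by
          simpa using altF_append _ [] h9
        rw [hT, hF]
        conv_rhs => rw [summer_69_actual_solution_alt]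
        simp only [dif_pos h6, if_neg h9]
        ring
    · have hsum : altT arr = arr.sum := by
        have := altT_append arr [] h6
        simpa [altT] using this
      rw [hsum, summer_69_actual_solution_alt]
      simp [h6]

-- ===== VERDICT (by name: the statement is the Claim_ definition above) =====
theorem summer_69_actual_solution_spec : Claim_equal_summer_69_actual_solution := by
  intro arr _
  unfold Spec_summer_69_actual_solution summer_69_actual_solution
  rw [(foldA_char arr 0).1, altT_eq_alt arr.length arr le_rfl]
  ring
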